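-- pv_equiv track=rewrite | github.com/datatecnica/genotools-server | microservices/carriers_api/src/core/harmonizer.py | _extract_path_info
-- ===== SOURCE A (Python) =====
-- def _extract_path_info(pfile: str) -> tuple:
--     """Extract ancestry, chromosome, and release info from path for cache keys"""
--     path_parts = pfile.split('/')
--     filename = path_parts[-1] if path_parts else pfile
--
--     ancestry = None
--     chromosome = None
--     release = None
--
--     # Try to extract from common naming patterns
--     if 'chr' in filename:
--         parts = filename.split('_')
--         for part in parts:
--             if part.startswith('chr'):
--                 chromosome = part.replace('chr', '')
--             elif part.startswith('release'):
--                 release = part.replace('release', '')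
--             elif len(part) == 3 and part.isupper():  # Ancestry codes like AAC, AFR
--                 ancestry = part
--
--     return ancestry, chromosome, release
-- ===== SOURCE B (Python) =====
-- def _extract_path_info(pfile: str) -> tuple:
--     """Extract ancestry, chromosome, and release info from path for cache keys"""
--     path_parts = pfile.split('/')
--     filename = path_parts[-1] if path_parts else pfile
--     if 'chr' not in filename:
--         return None, None, None
--     parts = filename.split('_')
--     # the three categories are mutually exclusive, so three independent
--     # last-match scans give exactly the loop's final state
--     chromosome = next((p.replace('chr', '') for p in reversed(parts) if p.startswith('chr')), None)
--     release = next((p.replace('release', '') for p in reversed(parts) if p.startswith('release')), None)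
--     ancestry = next((p for p in reversed(parts) if len(p) == 3 and p.isupper()), None)
--     return ancestry, chromosome, release
-- ===== Notes on version B (the rewrite author's own statement) =====
-- stated objective: alternative
-- what changed: The single stateful elif-chain loop over parts is replaced by three independent reversed-order first-match scans (next over reversed(parts)), one per field, relying on the provable mutual exclusivity of the three categories.
import Mathlib
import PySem

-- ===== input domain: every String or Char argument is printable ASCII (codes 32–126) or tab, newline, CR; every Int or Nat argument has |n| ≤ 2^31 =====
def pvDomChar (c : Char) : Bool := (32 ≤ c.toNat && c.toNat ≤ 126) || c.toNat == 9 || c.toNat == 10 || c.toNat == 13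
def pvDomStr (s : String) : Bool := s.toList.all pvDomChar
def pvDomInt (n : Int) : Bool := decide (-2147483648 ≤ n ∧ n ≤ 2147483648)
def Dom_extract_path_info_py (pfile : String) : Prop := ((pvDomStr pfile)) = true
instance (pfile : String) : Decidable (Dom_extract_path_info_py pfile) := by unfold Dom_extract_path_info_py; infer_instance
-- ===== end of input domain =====

-- B replaces A's single stateful elif-chain loop by three independent last-match scans (one per field);
-- equal because the three categories are mutually exclusive.  Objective: alternative decomposition, same cost.

-- shared helpers: Python str.isupper() (exact on ASCII: cased chars are exactly the letters)
-- and the three part predicates both Pythons test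
def pyIsupper (s : String) : Bool :=
  s.toList.any PySem.Chars.isalpha && s.toList.all (fun c => !PySem.Chars.islower c)

def chrP (p : String) : Bool := PySem.Str.startswith p "chr"
def relP (p : String) : Bool := PySem.Str.startswith p "release"
def ancP (p : String) : Bool := PySem.Str.len p == 3 && pyIsupper p

-- ===== PORT A =====
-- A's loop body (elif chain updating the (ancestry, chromosome, release) state)
def stepA (acc : Option String × Option String × Option String) (part : String) :
    Option String × Option String × Option String :=
  if chrP part then (acc.1, some (PySem.Str.replace part "chr" ""), acc.2.2)
  else if relP part then (acc.1, acc.2.1, some (PySem.Str.replace part "release" ""))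
  else if ancP part then (some part, acc.2.1, acc.2.2)
  else acc

-- path_parts = pfile.split('/'); filename = path_parts[-1] if path_parts else pfile  (same first two lines in both Pythons)
def pyFilename (pfile : String) : String :=
  let path_parts := (PySem.Str.split? pfile "/").getD []   -- sep "/" ≠ "" so split? is always some
  if path_parts.isEmpty then pfile else PySem.List.pyGetD path_parts (-1) ""

def extract_path_info_py (pfile : String) : Option String × Option String × Option String :=
  if PySem.Str.isIn "chr" (pyFilename pfile) then
    ((PySem.Str.split? (pyFilename pfile) "_").getD []).foldl stepA (none, none, none)   -- sep "_" ≠ "" so split? is always some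
  else (none, none, none)

-- ===== PORT B =====
-- three independent last-match scans (next(... for p in reversed(parts) ...))
def chrScan (parts : List String) : Option String :=
  (parts.reverse.find? chrP).map (fun p => PySem.Str.replace p "chr" "")
def relScan (parts : List String) : Option String :=
  (parts.reverse.find? relP).map (fun p => PySem.Str.replace p "release" "")
def ancScan (parts : List String) : Option String :=
  parts.reverse.find? ancP

def extract_path_info_py_alt (pfile : String) : Option String × Option String × Option String :=
  if PySem.Str.isIn "chr" (pyFilename pfile) then
    (ancScan ((PySem.Str.split? (pyFilename pfile) "_").getD []),
     chrScan ((PySem.Str.split? (pyFilename pfile) "_").getD []),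
     relScan ((PySem.Str.split? (pyFilename pfile) "_").getD []))   -- sep "_" ≠ "" so split? is always some
  else (none, none, none)

-- ===== PRECONDITION & SPEC =====
def Spec_extract_path_info_py (pfile : String) (out : Option String × Option String × Option String) : Prop := out = extract_path_info_py_alt pfile
instance (pfile : String) (out : Option String × Option String × Option String) : Decidable (Spec_extract_path_info_py pfile out) := by unfold Spec_extract_path_info_py; infer_instance

-- ===== CLAIM (what is proved, stated in full; the proofs are below) =====
def Claim_equal_extract_path_info_py : Prop := ∀ (pfile : String), Dom_extract_path_info_py pfile → Spec_extract_path_info_py pfile (extract_path_info_py pfile)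

-- ===== LEMMAS AND PROOFS =====

-- a part starting with 'chr' begins with a lowercase letter, so isupper() is false
lemma chr_not_anc (p : String) (h : chrP p = true) : ancP p = false := by
  simp only [chrP, PySem.Str.startswith_eq, PySem.Chars.startswith_iff] at h
  obtain ⟨t, ht⟩ := h
  simp only [ancP, pyIsupper, Bool.and_eq_false_iff]
  right
  simp only [List.all_eq_false]
  right
  exact ⟨'c', by rw [← ht]; simp, by decide⟩

-- a part starting with 'release' has length ≥ 7 ≠ 3
lemma rel_not_anc (p : String) (h : relP p = true) : ancP p = false := by
  simp only [relP, PySem.Str.startswith_eq, PySem.Chars.startswith_iff] at h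
  have hlen : 7 ≤ p.toList.length := by
    have := h.length_le
    simpa using this
  simp only [ancP, Bool.and_eq_false_iff]
  left
  simp only [PySem.Str.len, beq_eq_false_iff_ne, ne_eq]
  omega

-- a part cannot start with both 'chr' and 'release'
lemma chr_not_rel (p : String) (h : chrP p = true) : relP p = false := by
  simp only [chrP, PySem.Str.startswith_eq, PySem.Chars.startswith_iff] at h
  simp only [relP, PySem.Str.startswith_eq]
  rw [Bool.eq_false_iff]
  intro hr
  rw [PySem.Chars.startswith_iff] at hr
  obtain ⟨t1, e1⟩ := h
  obtain ⟨t2, e2⟩ := hr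
  rw [← e1] at e2
  simp at e2

-- A's fold equals, componentwise, the last match of each (mutually exclusive) predicate
lemma foldA_eq (ps : List String) (a c r : Option String) :
    ps.foldl stepA (a, c, r) =
      ((ps.reverse.find? ancP).or a,
       ((ps.reverse.find? chrP).map (fun p => PySem.Str.replace p "chr" "")).or c,
       ((ps.reverse.find? relP).map (fun p => PySem.Str.replace p "release" "")).or r) := by
  induction ps generalizing a c r with
  | nil => simp
  | cons p t ih =>
    simp only [List.foldl_cons, List.reverse_cons, List.find?_append]
    by_cases hc : chrP p = true
    · rw [show stepA (a, c, r) p = (a, some (PySem.Str.replace p "chr" ""), r) by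
        simp [stepA, hc]]
      rw [ih]
      simp [hc, chr_not_anc p hc, chr_not_rel p hc]
    · by_cases hr : relP p = true
      · rw [show stepA (a, c, r) p = (a, c, some (PySem.Str.replace p "release" "")) by
          simp [stepA, hc, hr]]
        rw [ih]
        simp [hc, hr, rel_not_anc p hr]
      · by_cases ha : ancP p = true
        · rw [show stepA (a, c, r) p = (some p, c, r) by simp [stepA, hc, hr, ha]]
          rw [ih]
          simp [hc, hr, ha]
        · rw [show stepA (a, c, r) p = (a, c, r) by simp [stepA, hc, hr, ha]]
          rw [ih]
          simp [hc, hr, ha]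

-- ===== VERDICT (by name: the statement is the Claim_ definition above) =====
theorem extract_path_info_py_spec : Claim_equal_extract_path_info_py := by
  intro pfile _
  unfold Spec_extract_path_info_py extract_path_info_py extract_path_info_py_alt
  by_cases h : PySem.Str.isIn "chr" (pyFilename pfile) = true
  · rw [if_pos h, if_pos h, foldA_eq]
    simp [ancScan, chrScan, relScan]
  · rw [if_neg h, if_neg h]
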